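-- pv_equiv track=rewrite | github.com/lancefreidrick/dashboard-test | backend/server/services/apocalypse_service.py | _rename_form_field_errors
-- ===== SOURCE A (Python) =====
-- def _rename_form_field_errors(data: dict):
--     if not data or not isinstance(data, dict):
--         return {}
--
--     error_fields = {}
--     for key in data:
--         if '_' in key:
--             words = key.split('_')
--             sub_key = ''.join(words[:1] + [(i[0].swapcase() + i[1:] if len(i) > 0 else i) for i in words[1:]])
--             error_fields[sub_key] = data[key]
--         else:
--             error_fields[key] = data[key]
--     return error_fields
-- ===== SOURCE B (Python) =====
-- def _rename_form_field_errors(data: dict):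
--     # Single char-by-char pass per key instead of split/join: after an underscore
--     # run the next character is swapcased; underscores are dropped.
--     error_fields = {}
--     for key, value in data.items():
--         out = []
--         swap_next = False
--         for ch in key:
--             if ch == '_':
--                 swap_next = True
--             else:
--                 out.append(ch.swapcase() if swap_next else ch)
--                 swap_next = False
--         error_fields[''.join(out)] = value
--     return error_fields
-- ===== Notes on version B (the rewrite author's own statement) =====
-- stated objective: alternative
-- what changed: The per-key split('_') + list comprehension + join transform is replaced by a single character-by-character scan with a swap_next flag that drops underscores and swapcases the character following an underscore run, so no intermediate word lists are built and the '_' in key branch disappears.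
import Mathlib
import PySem

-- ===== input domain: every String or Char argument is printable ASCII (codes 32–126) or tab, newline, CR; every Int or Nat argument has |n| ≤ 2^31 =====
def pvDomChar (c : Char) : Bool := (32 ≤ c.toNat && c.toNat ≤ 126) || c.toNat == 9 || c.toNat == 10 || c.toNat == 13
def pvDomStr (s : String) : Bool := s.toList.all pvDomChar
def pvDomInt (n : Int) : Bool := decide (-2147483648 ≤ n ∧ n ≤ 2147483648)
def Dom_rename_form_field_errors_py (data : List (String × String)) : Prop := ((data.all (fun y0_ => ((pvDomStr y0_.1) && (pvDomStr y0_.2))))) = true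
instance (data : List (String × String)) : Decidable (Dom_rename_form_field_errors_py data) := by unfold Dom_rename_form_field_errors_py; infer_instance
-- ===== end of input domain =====

-- B replaces the split('_')/join transform by one char-by-char scan per key; same dict loop, no intermediate word lists.

-- Python's str.swapcase() on one character; exact on the printable-ASCII domain (Dom_).
def pySwapcaseChar (c : Char) : Char :=
  if PySem.Chars.islower c then PySem.Chars.upperChar c
  else if PySem.Chars.isupper c then PySem.Chars.lowerChar c
  else c

-- ===== PORT A =====
-- `(i[0].swapcase() + i[1:] if len(i) > 0 else i)` for one word
def pvCapA (w : List Char) : List Char :=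
  match w with
  | [] => []
  | c :: rest => pySwapcaseChar c :: rest

-- `''.join(words[:1] + [… for i in words[1:]])`
def pvTransA (cs : List Char) : List Char :=
  let words := PySem.Chars.splitOn cs ['_']
  PySem.Chars.join [] (words.take 1 ++ (words.drop 1).map pvCapA)

def rename_form_field_errors_py (data : List (String × String)) : List (String × String) :=
  let d := PySem.Dict.ofList data
  if d.items = [] then []          -- `if not data … : return {}` (data is a dict here)
  else
    (d.items.foldl (fun ef p =>
        if PySem.Str.isIn "_" p.1 then
          ef.insert (String.ofList (pvTransA p.1.toList)) p.2
        else
          ef.insert p.1 p.2)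
      PySem.Dict.empty).items

-- ===== PORT B =====
-- the inner `for ch in key` loop with the swap_next flag (append = cons + recurse)
def pvScanB (cs : List Char) (swapNext : Bool) : List Char :=
  match cs with
  | [] => []
  | c :: rest =>
    if c = '_' then pvScanB rest true
    else (if swapNext then pySwapcaseChar c else c) :: pvScanB rest false

def rename_form_field_errors_py_alt (data : List (String × String)) : List (String × String) :=
  ((PySem.Dict.ofList data).items.foldl
    (fun ef p => ef.insert (String.ofList (pvScanB p.1.toList false)) p.2)
    PySem.Dict.empty).items

-- ===== PRECONDITION & SPEC =====
def Spec_rename_form_field_errors_py (data : List (String × String)) (out : List (String × String)) : Prop := out = rename_form_field_errors_py_alt data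
instance (data : List (String × String)) (out : List (String × String)) : Decidable (Spec_rename_form_field_errors_py data out) := by unfold Spec_rename_form_field_errors_py; infer_instance

-- ===== CLAIM (what is proved, stated in full; the proofs are below) =====
def Claim_equal_rename_form_field_errors_py : Prop := ∀ (data : List (String × String)), Dom_rename_form_field_errors_py data → Spec_rename_form_field_errors_py data (rename_form_field_errors_py data)


-- ===== LEMMAS AND PROOFS =====

-- reference splitter: (first word, remaining words) of cs.split('_')
def pvSplit (cs : List Char) : List Char × List (List Char) :=
  match cs with
  | [] => ([], [])
  | c :: rest =>
    let r := pvSplit rest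
    if c = '_' then ([], r.1 :: r.2) else (c :: r.1, r.2)

theorem pvGo_eq (fuel : Nat) (l cur : List Char) (acc : List (List Char))
    (h : l.length ≤ fuel) :
    PySem.Chars.splitOn.go ['_'] fuel l cur acc =
      acc.reverse ++ (cur.reverse ++ (pvSplit l).1) :: (pvSplit l).2 := by
  induction fuel generalizing l cur acc with
  | zero =>
    match l, h with
    | [], _ => rw [PySem.Chars.splitOn.go.eq_def]; simp [pvSplit]
  | succ n ih =>
    match l with
    | [] => rw [PySem.Chars.splitOn.go.eq_def]; simp [pvSplit]
    | c :: rest =>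
      rw [PySem.Chars.splitOn.go.eq_def]
      dsimp only
      by_cases hc : c = '_'
      · subst hc
        rw [if_pos (by simp [List.isPrefixOf])]
        simp only [List.length_cons, List.length_nil, List.drop_succ_cons, List.drop_zero]
        rw [ih rest [] (List.reverse cur :: acc) (by simpa using Nat.le_of_succ_le_succ h)]
        simp [pvSplit]
      · rw [if_neg (by simp [List.isPrefixOf]; exact fun h => hc h.symm)]
        rw [ih rest (c :: cur) acc (by simpa using Nat.le_of_succ_le_succ h)]
        simp [pvSplit, hc]

theorem pvSplitOn_eq (cs : List Char) :
    PySem.Chars.splitOn cs ['_'] = (pvSplit cs).1 :: (pvSplit cs).2 := by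
  unfold PySem.Chars.splitOn
  rw [pvGo_eq cs.length.succ cs [] [] (Nat.le_succ _)]
  simp

theorem pvJoin_nil (ws : List (List Char)) : PySem.Chars.join [] ws = ws.flatten := by
  simp [PySem.Chars.join, List.intercalate]
  induction ws with
  | nil => simp
  | cons w ws ih =>
    cases ws with
    | nil => simp
    | cons w' ws' => simpa [List.flatten] using ih

-- the key identity: A's split-based transform = B's scan, both flag states at once
theorem pvMain (cs : List Char) :
    ((pvSplit cs).1 ++ ((pvSplit cs).2.map pvCapA).flatten = pvScanB cs false) ∧
    ((pvCapA (pvSplit cs).1 :: (pvSplit cs).2.map pvCapA).flatten = pvScanB cs true) := by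
  induction cs with
  | nil => simp [pvSplit, pvScanB, pvCapA]
  | cons c rest ih =>
    by_cases hc : c = '_'
    · subst hc
      simp only [pvSplit, pvScanB, if_true]
      constructor
      · simpa [List.flatten] using ih.2
      · simpa [pvCapA, List.flatten] using ih.2
    · simp only [pvSplit, pvScanB, if_neg hc]
      constructor
      · simpa using ih.1
      · simpa [pvCapA] using ih.1

theorem pvScanB_no_underscore (cs : List Char) (h : '_' ∉ cs) : pvScanB cs false = cs := by
  induction cs with
  | nil => rfl
  | cons c rest ih =>
    simp at h
    simp [pvScanB, Ne.symm h.1, ih h.2]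

theorem pvTransA_eq (cs : List Char) : pvTransA cs = pvScanB cs false := by
  unfold pvTransA
  rw [pvSplitOn_eq, pvJoin_nil]
  simpa using (pvMain cs).1

theorem pvStep_eq (ef : PySem.Dict String String) (p : String × String) :
    (if PySem.Str.isIn "_" p.1 then
        ef.insert (String.ofList (pvTransA p.1.toList)) p.2
      else ef.insert p.1 p.2)
    = ef.insert (String.ofList (pvScanB p.1.toList false)) p.2 := by
  by_cases h : PySem.Str.isIn "_" p.1
  · rw [if_pos h, pvTransA_eq]
  · rw [if_neg h]
    have hni : '_' ∉ p.1.toList := by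
      intro hmem
      apply h
      rw [PySem.Str.isIn_iff_infix]
      obtain ⟨l, r, hlr⟩ := List.append_of_mem hmem
      exact ⟨l, r, by simp [hlr]⟩
    rw [pvScanB_no_underscore _ hni, String.ofList_toList]

-- ===== VERDICT (by name: the statement is the Claim_ definition above) =====
theorem rename_form_field_errors_py_spec : Claim_equal_rename_form_field_errors_py := by
  intro data _
  unfold Spec_rename_form_field_errors_py
  unfold rename_form_field_errors_py rename_form_field_errors_py_alt
  have hfold :
      ((PySem.Dict.ofList data).items.foldl (fun ef p =>
          if PySem.Str.isIn "_" p.1 then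
            ef.insert (String.ofList (pvTransA p.1.toList)) p.2
          else ef.insert p.1 p.2) PySem.Dict.empty)
      = ((PySem.Dict.ofList data).items.foldl
          (fun ef p => ef.insert (String.ofList (pvScanB p.1.toList false)) p.2)
          PySem.Dict.empty) := by
    congr 1
    funext ef p
    exact pvStep_eq ef p
  by_cases he : (PySem.Dict.ofList data).items = []
  · rw [if_pos he, he]
    rfl
  · rw [if_neg he, hfold]
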